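-- pv_equiv track=rewrite | github.com/humayunraza1/ReactJS-E-commerce-Store | daa-assignment.py | find_first_one
-- ===== SOURCE A (Python) =====
-- def find_first_one(arr):
--     left = 0
--     right = len(arr) - 1
--     result = -1  # Initialize result to indicate if no 1 is found
--
--     while left <= right:
--         mid = (left + right) // 2
--
--         if arr[mid] == 1:
--             result = mid  # Found a 1, but we need to check for earlier ones
--             right = mid - 1  # Continue searching in the left half
--         else:
--             left = mid + 1  # Continue searching in the right half
--
--     return result  # Returns the index of the first 1, or -1 if no 1 is found
-- ===== SOURCE B (Python) =====
-- def find_first_one(arr):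
--     # Recurse on list slices carrying a base offset instead of left/right bounds.
--     def seg_search(seg, base):
--         if not seg:
--             return -1
--         m = (len(seg) - 1) // 2
--         if seg[m] == 1:
--             res = seg_search(seg[:m], base)
--             return base + m if res == -1 else res
--         return seg_search(seg[m + 1:], base + m + 1)
--     return seg_search(arr, 0)
-- ===== Notes on version B (the rewrite author's own statement) =====
-- stated objective: alternative
-- what changed: Replaced the iterative left/right-bounds loop with a recursion on list slices: the helper carries the current segment and a base offset, probes the segment's middle element, and recurses on seg[:m] or seg[m+1:], so no index bounds or result accumulator are maintained.
import Mathlib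
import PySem

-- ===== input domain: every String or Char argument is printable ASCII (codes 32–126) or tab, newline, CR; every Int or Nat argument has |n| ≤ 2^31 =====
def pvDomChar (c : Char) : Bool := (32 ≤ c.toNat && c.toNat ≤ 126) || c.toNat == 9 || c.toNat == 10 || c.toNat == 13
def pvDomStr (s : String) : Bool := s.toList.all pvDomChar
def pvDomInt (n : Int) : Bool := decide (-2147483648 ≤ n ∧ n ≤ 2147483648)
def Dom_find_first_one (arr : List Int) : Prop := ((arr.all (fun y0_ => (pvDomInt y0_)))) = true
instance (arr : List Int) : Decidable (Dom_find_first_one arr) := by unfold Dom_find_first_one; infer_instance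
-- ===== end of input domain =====

-- B replaces A's left/right-bounds loop by a recursion on list slices with a base offset (alternative decomposition).

-- ===== PORT A =====
-- A's while-loop, transcribed with a fuel counter (fuel = len+1 always suffices: the bracket
-- shrinks each iteration); arr[mid] is always in range on reachable states, so .getD 0 is never used.
def ffoLoop (arr : List Int) : Nat → Int → Int → Int → Int
  | 0, _, _, result => result
  | fuel+1, left, right, result =>
    if left ≤ right then
      if (PySem.List.pyGet? arr (PySem.Int.floordiv (left + right) 2)).getD 0 = 1 then
        ffoLoop arr fuel left (PySem.Int.floordiv (left + right) 2 - 1) (PySem.Int.floordiv (left + right) 2)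
      else
        ffoLoop arr fuel (PySem.Int.floordiv (left + right) 2 + 1) right result
    else result

def find_first_one (arr : List Int) : Int :=
  ffoLoop arr (arr.length + 1) 0 ((arr.length : Int) - 1) (-1)

-- ===== PORT B =====
-- Source B's seg_search: structural recursion on the segment; seg[m] with 0 ≤ m < len(seg) is exact as getD.
def ffoSeg (seg : List Int) (base : Int) : Int :=
  if hseg : seg = [] then -1
  else
    let m := (seg.length - 1) / 2
    if seg.getD m 0 = 1 then
      let res := ffoSeg (seg.take m) base
      if res = -1 then base + (m : Int) else res
    else ffoSeg (seg.drop (m + 1)) (base + (m : Int) + 1)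
termination_by seg.length
decreasing_by
  · simp only [List.length_take]
    have := List.length_pos_iff.mpr hseg
    omega
  · simp only [List.length_drop]
    have := List.length_pos_iff.mpr hseg
    omega

def find_first_one_alt (arr : List Int) : Int := ffoSeg arr 0

-- ===== PRECONDITION & SPEC =====
def Spec_find_first_one (arr : List Int) (out : Int) : Prop := out = find_first_one_alt arr
instance (arr : List Int) (out : Int) : Decidable (Spec_find_first_one arr out) := by unfold Spec_find_first_one; infer_instance

-- ===== CLAIM (what is proved, stated in full; the proofs are below) =====
def Claim_equal_find_first_one : Prop := ∀ (arr : List Int), Dom_find_first_one arr → Spec_find_first_one arr (find_first_one arr)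

-- ===== LEMMAS AND PROOFS =====
theorem ffoSeg_ne_nil (seg : List Int) (base : Int) (h : seg ≠ []) :
    ffoSeg seg base =
      (if seg.getD ((seg.length - 1) / 2) 0 = 1 then
        (if ffoSeg (seg.take ((seg.length - 1) / 2)) base = -1 then
           base + (((seg.length - 1) / 2 : Nat) : Int)
         else ffoSeg (seg.take ((seg.length - 1) / 2)) base)
       else ffoSeg (seg.drop ((seg.length - 1) / 2 + 1))
              (base + (((seg.length - 1) / 2 : Nat) : Int) + 1)) := by
  rw [ffoSeg]
  simp [h]

theorem loop_eq_seg (arr : List Int) (fuel : Nat) (l r res : Int)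
    (hl : 0 ≤ l) (hlr : l ≤ r + 1) (hr : r + 1 ≤ (arr.length : Int))
    (hf : (r + 1 - l).toNat < fuel) :
    ffoLoop arr fuel l r res =
      (if ffoSeg ((arr.drop l.toNat).take (r + 1 - l).toNat) l = -1 then res
       else ffoSeg ((arr.drop l.toNat).take (r + 1 - l).toNat) l) := by
  induction fuel generalizing l r res with
  | zero => omega
  | succ fuel ih =>
    by_cases h : l ≤ r
    · -- segment facts
      obtain ⟨n, hn⟩ : ∃ k : Nat, (r + 1 - l).toNat = k := ⟨_, rfl⟩
      rw [hn] at hf ⊢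
      have hlen : ((arr.drop l.toNat).take n).length = n := by
        simp only [List.length_take, List.length_drop]
        omega
      have hne : (arr.drop l.toNat).take n ≠ [] := by
        intro hnil
        rw [hnil] at hlen
        simp at hlen
        omega
      obtain ⟨m, hm⟩ : ∃ k : Nat, (n - 1) / 2 = k := ⟨_, rfl⟩
      have hn1 : 1 ≤ n := by omega
      have hmn : m < n := by omega
      have hnf : n ≤ fuel := by omega
      have hfm : m < fuel := by omega
      have hrn : r + 1 - l = (n : Int) := by omega
      have hmid : PySem.Int.floordiv (l + r) 2 = l + (m : Int) := by
        rw [PySem.Int.floordiv_eq_ediv_of_pos (by omega)]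
        omega
      have hmt : (l + (m : Int)).toNat = l.toNat + m := by omega
      have hget : (PySem.List.pyGet? arr (PySem.Int.floordiv (l + r) 2)).getD 0
          = ((arr.drop l.toNat).take n).getD m 0 := by
        rw [hmid, PySem.List.pyGet?_of_nonneg arr (by omega), hmt]
        simp only [List.getD_eq_getElem?_getD, List.getElem?_take, List.getElem?_drop]
        rw [if_pos hmn]
      rw [ffoLoop]
      rw [if_pos h, hget, hmid]
      rw [ffoSeg_ne_nil _ _ hne, hlen, hm]
      by_cases hc : ((arr.drop l.toNat).take n).getD m 0 = 1
      · rw [if_pos hc, if_pos hc]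
        have hseg' : (arr.drop l.toNat).take ((l + (m:Int)) - 1 + 1 - l).toNat
            = ((arr.drop l.toNat).take n).take m := by
          rw [List.take_take]
          congr 1
          omega
        rw [ih l ((l + (m:Int)) - 1) (l + (m:Int)) hl (by omega) (by omega) (by omega)]
        rw [hseg']
        by_cases h1 : ffoSeg (((arr.drop l.toNat).take n).take m) l = -1
        · rw [if_pos h1, if_neg (by omega)]
        · rw [if_neg h1, if_neg h1]
      · rw [if_neg hc, if_neg hc]
        have hseg' : (arr.drop (l + (m:Int) + 1).toNat).take (r + 1 - (l + (m:Int) + 1)).toNat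
            = ((arr.drop l.toNat).take n).drop (m + 1) := by
          rw [List.drop_take, List.drop_drop]
          congr 1
          · omega
          · congr 1
            omega
        rw [ih (l + (m:Int) + 1) r res (by omega) (by omega) hr (by omega)]
        rw [hseg']
    · rw [ffoLoop, if_neg h]
      have : (r + 1 - l).toNat = 0 := by omega
      rw [this]
      simp only [List.take_zero]
      rw [ffoSeg]
      simp

-- ===== VERDICT (by name: the statement is the Claim_ definition above) =====
theorem find_first_one_spec : Claim_equal_find_first_one := by
  intro arr _
  unfold Spec_find_first_one find_first_one find_first_one_alt
  rw [loop_eq_seg arr _ 0 _ _ le_rfl (by omega) (by omega) (by omega)]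
  simp only [Int.toNat_zero, List.drop_zero]
  have : ((arr.length : Int) - 1 + 1 - 0).toNat = arr.length := by omega
  rw [this, List.take_length]
  split <;> simp_all
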